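-- pv_equiv track=rewrite | github.com/zuohao123/VoVNet | src/data/collate.py | _pick_answer_from_list
-- ===== SOURCE A (Python) =====
-- from collections import Counter
-- from typing import Any, Dict, Iterable, List, Optional
--
-- def _pick_answer_from_list(values: Iterable[Any]) -> str:
--     """Pick a stable representative answer from multiple annotations."""
--     seen: List[str] = []
--     norm_to_first: Dict[str, str] = {}
--     counts: Counter[str] = Counter()
--     for item in values:
--         if item in (None, ""):
--             continue
--         text = str(item).strip()
--         if not text:
--             continue
--         norm = text.lower()
--         counts[norm] += 1
--         if norm not in norm_to_first:
--             norm_to_first[norm] = text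
--         seen.append(text)
--     if not counts:
--         return ""
--     # Most frequent normalized answer; ties resolve to earliest occurrence.
--     best_norm, _ = max(counts.items(), key=lambda kv: (kv[1], -seen.index(norm_to_first[kv[0]])))
--     return norm_to_first[best_norm]
-- ===== SOURCE B (Python) =====
-- from typing import Any, Iterable
--
--
-- def _pick_answer_from_list(values: Iterable[Any]) -> str:
--     """Pick a stable representative answer from multiple annotations.
--
--     Staged, dictionary-free: collect the cleaned texts, then scan the
--     first occurrence of each normalized answer and keep the one whose
--     (count, -first index) key is largest.
--     """
--     texts = []
--     for v in values:
--         if v in (None, ""):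
--             continue
--         t = str(v).strip()
--         if t:
--             texts.append(t)
--     norms = [t.lower() for t in texts]
--     best, best_count, best_negi = "", 0, 1
--     for i in range(len(texts)):
--         n = norms[i]
--         if n in norms[:i]:
--             continue  # not the first occurrence of this normalized answer
--         c = norms.count(n)
--         if (c, -i) > (best_count, best_negi):
--             best, best_count, best_negi = texts[i], c, -i
--     return best
-- ===== Notes on version B (the rewrite author's own statement) =====
-- stated objective: alternative
-- what changed: B drops A's Counter/dict machinery entirely: it stages the work over plain lists (clean, lowercase, then one selection scan over first-occurrence indices using norms.count and the index itself as the key), instead of A's single dict-building pass followed by max over counts.items with a seen.index scan in the key.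
import Mathlib
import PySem

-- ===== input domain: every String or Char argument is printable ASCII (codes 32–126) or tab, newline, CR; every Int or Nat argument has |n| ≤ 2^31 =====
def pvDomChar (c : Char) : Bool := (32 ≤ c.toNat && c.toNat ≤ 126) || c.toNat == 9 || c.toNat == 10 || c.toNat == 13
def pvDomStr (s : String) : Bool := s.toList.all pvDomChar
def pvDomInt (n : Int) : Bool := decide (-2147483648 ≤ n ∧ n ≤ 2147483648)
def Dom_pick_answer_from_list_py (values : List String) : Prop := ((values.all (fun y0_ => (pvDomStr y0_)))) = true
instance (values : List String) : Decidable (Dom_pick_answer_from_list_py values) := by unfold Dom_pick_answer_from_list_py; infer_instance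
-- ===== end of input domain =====

-- B is a dictionary-free staged re-implementation (clean list, lowered list, one selection scan over first occurrences); alternative structure, same asymptotic cost.

-- ===== PORT A =====
-- A's loop state: (seen, norm_to_first, counts)
def pickStepA (s : List String × PySem.Dict String String × PySem.Dict String Int) (item : String) :
    List String × PySem.Dict String String × PySem.Dict String Int :=
  if item == "" then s
  else
    let text := PySem.Str.strip item
    if text == "" then s
    else
      let norm := PySem.Str.lower text
      let counts := s.2.2.modify norm 0 (· + 1)
      let ntf := if s.2.1.contains norm then s.2.1 else s.2.1.insert norm text
      (s.1 ++ [text], ntf, counts)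

def pick_answer_from_list_py (values : List String) : String :=
  let st := values.foldl pickStepA ([], PySem.Dict.empty, PySem.Dict.empty)
  let seen := st.1
  let ntf := st.2.1
  let counts := st.2.2
  if counts.items = [] then ""
  else
    -- max(counts.items(), key=lambda kv: (kv[1], -seen.index(norm_to_first[kv[0]])));
    -- the .getD totalize dict/.index lookups that never miss here (the key is always present, the text always in seen)
    match PySem.List.max2? counts.items (fun kv => kv.2)
        (fun kv => -(((PySem.List.index? seen (ntf.getD kv.1 "")).getD 0 : Nat) : Int)) with
    | some kv => ntf.getD kv.1 ""
    | none => ""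

-- ===== PORT B =====
-- 'texts.append(t)' loop of Source B
def pickTextStep (acc : List String) (v : String) : List String :=
  if v == "" then acc
  else
    let t := PySem.Str.strip v
    if t == "" then acc else acc ++ [t]

-- selection loop body of Source B; i comes from range(len(texts)) so indexing is in range (getD is exact there)
def pickSelStep (texts norms : List String) (s : String × Int × Int) (i : Nat) : String × Int × Int :=
  let n := norms.getD i ""
  if (norms.take i).contains n then s
  else
    let c : Int := (norms.count n : Int)
    if s.2.1 < c ∨ (¬ c < s.2.1 ∧ s.2.2 < -(i : Int)) then (texts.getD i "", c, -(i : Int)) else s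

def pick_answer_from_list_py_alt (values : List String) : String :=
  let texts := values.foldl pickTextStep []
  let norms := texts.map PySem.Str.lower
  ((List.range texts.length).foldl (pickSelStep texts norms) ("", 0, 1)).1

-- ===== PRECONDITION & SPEC =====
def Spec_pick_answer_from_list_py (values : List String) (out : String) : Prop := out = pick_answer_from_list_py_alt values
instance (values : List String) (out : String) : Decidable (Spec_pick_answer_from_list_py values out) := by unfold Spec_pick_answer_from_list_py; infer_instance

-- ===== CLAIM (what is proved, stated in full; the proofs are below) =====
def Claim_equal_pick_answer_from_list_py : Prop := ∀ (values : List String), Dom_pick_answer_from_list_py values → Spec_pick_answer_from_list_py values (pick_answer_from_list_py values)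

-- ===== LEMMAS AND PROOFS =====

-- Python's max(_, key=(k1, k2)) step (first maximal element wins), specialized to Int keys
def pmStep {α : Type} (k1 k2 : α → Int) (acc : Option α) (x : α) : Option α :=
  match acc with
  | none => some x
  | some m => if k1 m < k1 x ∨ (¬ k1 x < k1 m ∧ k2 m < k2 x) then some x else some m

theorem max2?_eq_foldl_pmStep {α : Type} (l : List α) (k1 k2 : α → Int) :
    PySem.List.max2? l k1 k2 = l.foldl (pmStep k1 k2) none := by
  unfold PySem.List.max2?
  congr 1
  funext acc x
  cases acc with
  | none => rfl
  | some m => simp [pmStep]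

theorem foldl_pmStep_map {β α : Type} (f : β → α) (kb1 kb2 : α → Int) (ka1 ka2 : β → Int)
    (l : List β) (acc : Option β)
    (hacc : ∀ m, acc = some m → kb1 (f m) = ka1 m ∧ kb2 (f m) = ka2 m)
    (hl : ∀ x ∈ l, kb1 (f x) = ka1 x ∧ kb2 (f x) = ka2 x) :
    (l.map f).foldl (pmStep kb1 kb2) (acc.map f) = Option.map f (l.foldl (pmStep ka1 ka2) acc) := by
  induction l generalizing acc with
  | nil => simp
  | cons x t ih =>
    have hx := hl x (by simp)
    have hstep : pmStep kb1 kb2 (acc.map f) (f x) = Option.map f (pmStep ka1 ka2 acc x) := by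
      cases acc with
      | none => rfl
      | some m =>
        have hm := hacc m rfl
        simp only [pmStep, Option.map_some, hx.1, hx.2, hm.1, hm.2]
        split_ifs <;> rfl
    simp only [List.map_cons, List.foldl_cons, hstep]
    exact ih (pmStep ka1 ka2 acc x)
      (by
        intro m hm
        cases acc with
        | none =>
          simp only [pmStep] at hm
          cases hm; exact hx
        | some m0 =>
          simp only [pmStep] at hm
          split_ifs at hm
          · exact (Option.some.inj hm) ▸ hx
          · exact (Option.some.inj hm) ▸ hacc m0 rfl)
      (fun y hy => hl y (by simp [hy]))

-- the triple-accumulator selection step of Source B, abstracted over keys and value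
def tStep {α : Type} (v : α → String) (k1 k2 : α → Int) (s : String × Int × Int) (x : α) :
    String × Int × Int :=
  if s.2.1 < k1 x ∨ (¬ k1 x < s.2.1 ∧ s.2.2 < k2 x) then (v x, k1 x, k2 x) else s

-- the triple fold started at an element's own key mirrors the Option fold started at some element
theorem tStep_foldl_eq {α : Type} (v : α → String) (k1 k2 : α → Int) (l : List α) (m : α) :
    l.foldl (tStep v k1 k2) (v m, k1 m, k2 m)
      = (match l.foldl (pmStep k1 k2) (some m) with
         | some m' => (v m', k1 m', k2 m')
         | none => ("", 0, 1)) := by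
  induction l generalizing m with
  | nil => rfl
  | cons x t ih =>
    simp only [List.foldl_cons, tStep, pmStep]
    split_ifs with h
    · exact ih x
    · exact ih m

-- first-occurrence facts packaged from index?
theorem index?_facts {xs : List String} {v : String} {j : Nat}
    (h : PySem.List.index? xs v = some j) :
    j < xs.length ∧ xs.getD j "" = v ∧ (xs.take j).contains v = false := by
  rw [PySem.List.index?_eq_some_iff] at h
  obtain ⟨pre, suf, hxs, hlen, hnot⟩ := h
  subst hxs
  refine ⟨?_, ?_, ?_⟩
  · simp [← hlen]
  · subst hlen
    simp [List.getD]
  · subst hlen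
    rw [List.take_left' rfl]
    simp [hnot]

-- the candidate indices of Source B's scan are exactly the first-occurrence index of each distinct norm
theorem candidates_eq (l : List String) :
    (List.range l.length).filter (fun i => !((l.take i).contains (l.getD i ""))) =
      (PySem.Set.ofList l).map (fun k => (PySem.List.index? l k).getD 0) := by
  induction l using List.reverseRecOn with
  | nil => rfl
  | append_singleton l x ih =>
    rw [List.length_append, List.length_singleton, List.range_succ, List.filter_append,
      PySem.Set.ofList_append_singleton]
    have hfilter :
        (List.range l.length).filter
            (fun i => !(((l ++ [x]).take i).contains ((l ++ [x]).getD i ""))) =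
          (List.range l.length).filter (fun i => !((l.take i).contains (l.getD i ""))) := by
      apply List.filter_congr
      intro i hi
      have hi' : i < l.length := List.mem_range.mp hi
      rw [List.take_append_of_le_length (le_of_lt hi'), List.getD,
        List.getElem?_append_left hi']
      rfl
    rw [hfilter, ih]
    have htake : (l ++ [x]).take l.length = l := List.take_left
    have hgd : (l ++ [x]).getD l.length "" = x := by
      simp [List.getD]
    by_cases hx : x ∈ l
    · have hc : (PySem.Set.ofList l).contains x = true := by
        rw [PySem.Set.contains_iff, PySem.Set.mem_ofList]; exact hx
      have hadd : PySem.Set.add (PySem.Set.ofList l) x = PySem.Set.ofList l := by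
        simp [PySem.Set.add, hx]
      rw [hadd]
      have : (List.filter (fun i => !((l ++ [x]).take i).contains ((l ++ [x]).getD i ""))
          [l.length]) = [] := by
        simp [List.filter, htake, hx]
      rw [this, List.append_nil]
      apply List.map_congr_left
      intro k hk
      rw [PySem.List.index?_append_of_mem [x] ((PySem.Set.mem_ofList _ _).mp hk)]
    · have hc : (PySem.Set.ofList l).contains x = false := by
        rw [← Bool.not_eq_true, PySem.Set.contains_iff, PySem.Set.mem_ofList]; exact hx
      have hadd : PySem.Set.add (PySem.Set.ofList l) x = PySem.Set.ofList l ++ [x] := by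
        simp [PySem.Set.add, hx]
      rw [hadd, List.map_append]
      have h1 : (List.filter (fun i => !((l ++ [x]).take i).contains ((l ++ [x]).getD i ""))
          [l.length]) = [l.length] := by
        simp [List.filter, htake, hx]
      rw [h1]
      congr 1
      · apply List.map_congr_left
        intro k hk
        rw [PySem.List.index?_append_of_mem [x] ((PySem.Set.mem_ofList _ _).mp hk)]
      · have h2 := PySem.List.index?_append_singleton_self l x hx
        simp only [PySem.List.index?_eq_idxOf?] at h2
        simp [h2]

-- A's first accumulator component is exactly Source B's texts loop
theorem pickStepA_fst (l : List String)
    (s : List String × PySem.Dict String String × PySem.Dict String Int) :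
    (l.foldl pickStepA s).1 = l.foldl pickTextStep s.1 := by
  induction l generalizing s with
  | nil => rfl
  | cons x t ih =>
    simp only [List.foldl_cons]
    rw [ih]
    congr 1
    simp only [pickStepA, pickTextStep]
    split_ifs <;> rfl

-- the loop invariant of A's pass, expressed through list primitives
def pickInv (seen : List String) (ntf : PySem.Dict String String)
    (counts : PySem.Dict String Int) : Prop :=
  counts.keys = PySem.Set.ofList (seen.map PySem.Str.lower)
  ∧ ntf.keys = counts.keys
  ∧ ∀ k ∈ counts.keys,
      counts.getD k 0 = ((seen.map PySem.Str.lower).count k : Int)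
      ∧ ∃ j : Nat, PySem.List.index? (seen.map PySem.Str.lower) k = some j
          ∧ PySem.List.index? seen (ntf.getD k "") = some j
          ∧ seen.getD j "" = ntf.getD k ""

theorem pickInv_step (seen : List String) (ntf : PySem.Dict String String)
    (counts : PySem.Dict String Int) (h : pickInv seen ntf counts) (item : String) :
    pickInv (pickStepA (seen, ntf, counts) item).1 (pickStepA (seen, ntf, counts) item).2.1
      (pickStepA (seen, ntf, counts) item).2.2 := by
  obtain ⟨hkeys, hntf, hK⟩ := h
  by_cases h1 : item = ""
  · simpa [pickStepA, h1] using ⟨hkeys, hntf, hK⟩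
  by_cases h2 : PySem.Str.strip item = ""
  · simpa [pickStepA, h1, h2] using ⟨hkeys, hntf, hK⟩
  simp only [pickStepA, beq_iff_eq, h1, h2, if_false]
  set text := PySem.Str.strip item with htext
  set norm := PySem.Str.lower text with hnorm
  set norms := seen.map PySem.Str.lower with hnorms
  have hmap : (seen ++ [text]).map PySem.Str.lower = norms ++ [norm] := by
    simp [hnorms, hnorm]
  by_cases hmem : norm ∈ counts.keys
  · -- existing normalized answer
    have hmemn : norm ∈ norms := by rwa [hkeys, PySem.Set.mem_ofList] at hmem
    have hcA : ntf.contains norm = true :=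
      (PySem.Dict.contains_iff_mem_keys ntf norm).mpr (hntf ▸ hmem)
    have hcC : counts.contains norm = true :=
      (PySem.Dict.contains_iff_mem_keys counts norm).mpr hmem
    have hifA : (if ntf.contains norm = true then ntf else ntf.insert norm text) = ntf := by
      simp [hcA]
    have hkeys' : (counts.modify norm 0 (· + 1)).keys = counts.keys := by
      rw [PySem.Dict.keys_modify, PySem.Dict.keys_insert_of_contains counts _ hcC]
    refine ⟨?_, ?_, ?_⟩
    · rw [hkeys', hmap, PySem.Set.ofList_append_singleton, hkeys]
      have : (PySem.Set.ofList norms).contains norm = true := by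
        rw [PySem.Set.contains_iff, PySem.Set.mem_ofList]; exact hmemn
      simp [PySem.Set.add, hmemn]
    · rw [hifA, hkeys', hntf]
    · intro k hk
      rw [hkeys'] at hk
      obtain ⟨hcnt, j, hj1, hj2, hj3⟩ := hK k hk
      have hjf := index?_facts hj2
      have hkn_mem : ntf.getD k "" ∈ seen := by
        have := PySem.List.index?_isSome_iff (xs := seen) (v := ntf.getD k "")
        rw [hj2] at this; simpa using this.mp rfl
      refine ⟨?_, j, ?_, ?_, ?_⟩
      · rw [hmap]
        by_cases hkn : k = norm
        · subst hkn
          rw [PySem.Dict.getD_modify_self, hcnt, List.count_append]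
          simp
        · rw [PySem.Dict.getD_modify_of_ne counts _ _ hkn, hcnt, List.count_append]
          have : ([norm].count k) = 0 := by
            simp [List.count_singleton]
            exact fun he => hkn he.symm
          omega
      · rw [hmap, PySem.List.index?_append_of_mem [norm] ?_, hj1]
        have := PySem.List.index?_isSome_iff (xs := norms) (v := k)
        rw [hj1] at this; simpa using this.mp rfl
      · rw [hifA, PySem.List.index?_append_of_mem [text] hkn_mem, hj2]
      · rw [hifA, List.getD, List.getElem?_append_left hjf.1]
        rw [List.getD] at hj3
        exact hj3
  · -- fresh normalized answer
    have hmemn : norm ∉ norms := by rwa [hkeys, PySem.Set.mem_ofList] at hmem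
    have hcA : ntf.contains norm = false := by
      rw [← Bool.not_eq_true, PySem.Dict.contains_iff_mem_keys, hntf]; exact hmem
    have hcC : counts.contains norm = false := by
      rw [← Bool.not_eq_true, PySem.Dict.contains_iff_mem_keys]; exact hmem
    have hifA : (if ntf.contains norm = true then ntf else ntf.insert norm text)
        = ntf.insert norm text := by simp [hcA]
    have htnotin : text ∉ seen := by
      intro ht
      exact hmemn (by rw [hnorms]; exact List.mem_map_of_mem ht)
    have hkeys' : (counts.modify norm 0 (· + 1)).keys = counts.keys ++ [norm] := by
      rw [PySem.Dict.keys_modify, PySem.Dict.keys_insert_of_not_contains counts _ hcC]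
    refine ⟨?_, ?_, ?_⟩
    · rw [hkeys', hmap, PySem.Set.ofList_append_singleton, hkeys]
      have : (PySem.Set.ofList norms).contains norm = false := by
        rw [← Bool.not_eq_true, PySem.Set.contains_iff, PySem.Set.mem_ofList]; exact hmemn
      simp [PySem.Set.add, hmemn]
    · rw [hifA, hkeys', PySem.Dict.keys_insert_of_not_contains ntf _ hcA, hntf]
    · intro k hk
      rw [hkeys'] at hk
      rcases List.mem_append.mp hk with hk' | hk'
      · have hkn : k ≠ norm := fun he => hmem (he ▸ hk')
        obtain ⟨hcnt, j, hj1, hj2, hj3⟩ := hK k hk'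
        have hjf := index?_facts hj2
        have hkn_mem : ntf.getD k "" ∈ seen := by
          have := PySem.List.index?_isSome_iff (xs := seen) (v := ntf.getD k "")
          rw [hj2] at this; simpa using this.mp rfl
        rw [hifA]
        refine ⟨?_, j, ?_, ?_, ?_⟩
        · rw [hmap, PySem.Dict.getD_modify_of_ne counts _ _ hkn, hcnt, List.count_append]
          have : ([norm].count k) = 0 := by
            simp [List.count_singleton]
            exact fun he => hkn he.symm
          omega
        · rw [hmap, PySem.List.index?_append_of_mem [norm] ?_, hj1]
          have := PySem.List.index?_isSome_iff (xs := norms) (v := k)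
          rw [hj1] at this; simpa using this.mp rfl
        · rw [PySem.Dict.getD_insert_of_ne ntf _ _ hkn,
            PySem.List.index?_append_of_mem [text] hkn_mem, hj2]
        · rw [PySem.Dict.getD_insert_of_ne ntf _ _ hkn, List.getD,
            List.getElem?_append_left hjf.1]
          rw [List.getD] at hj3
          exact hj3
      · rw [List.mem_singleton.mp hk', hifA]
        refine ⟨?_, seen.length, ?_, ?_, ?_⟩
        · rw [hmap, PySem.Dict.getD_modify_self,
            PySem.Dict.getD_of_not_contains counts _ hcC, List.count_append]
          have h0 : norms.count norm = 0 := List.count_eq_zero.mpr hmemn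
          simp [h0]
        · rw [hmap, PySem.List.index?_append_singleton_self norms norm hmemn]
          simp [hnorms]
        · rw [PySem.Dict.getD_insert_self,
            PySem.List.index?_append_singleton_self seen text htnotin]
        · rw [PySem.Dict.getD_insert_self]
          simp [List.getD]

theorem pickInv_foldl (l : List String) (seen : List String) (ntf : PySem.Dict String String)
    (counts : PySem.Dict String Int) (h : pickInv seen ntf counts) :
    pickInv (l.foldl pickStepA (seen, ntf, counts)).1 (l.foldl pickStepA (seen, ntf, counts)).2.1
      (l.foldl pickStepA (seen, ntf, counts)).2.2 := by
  induction l generalizing seen ntf counts with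
  | nil => exact h
  | cons x t ih =>
    simp only [List.foldl_cons]
    exact ih _ _ _ (pickInv_step seen ntf counts h x)

-- ===== VERDICT (by name: the statement is the Claim_ definition above) =====
theorem pick_answer_from_list_py_spec : Claim_equal_pick_answer_from_list_py := by
  intro values _hdom
  unfold Spec_pick_answer_from_list_py
  unfold pick_answer_from_list_py pick_answer_from_list_py_alt
  have hinv := pickInv_foldl values [] PySem.Dict.empty PySem.Dict.empty
    (by refine ⟨rfl, rfl, ?_⟩; intro k hk; simp [PySem.Dict.keys_empty] at hk)
  set stA := values.foldl pickStepA ([], PySem.Dict.empty, PySem.Dict.empty) with hstA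
  have htexts : values.foldl pickTextStep [] = stA.1 := by
    rw [hstA]; exact (pickStepA_fst values ([], PySem.Dict.empty, PySem.Dict.empty)).symm
  obtain ⟨seen, ntf, counts⟩ := stA
  obtain ⟨hkeys, hntf, hK⟩ := hinv
  simp only at hkeys hntf hK htexts
  rw [htexts]
  dsimp only
  set norms := seen.map PySem.Str.lower with hnorms
  -- B side: skip-loop → filter → first-occurrence candidates
  have hstep : pickSelStep seen norms
      = (fun s i => if (!(norms.take i).contains (norms.getD i "")) = true
          then (let n := norms.getD i ""
                let c : Int := (norms.count n : Int)
                if s.2.1 < c ∨ (¬ c < s.2.1 ∧ s.2.2 < -(i : Int))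
                then (seen.getD i "", c, -(i : Int)) else s)
          else s) := by
    funext s i
    simp only [pickSelStep]
    cases hc : (norms.take i).contains (norms.getD i "")
    · simp
    · simp
  have hlen : seen.length = norms.length := by simp [hnorms]
  rw [show (List.range seen.length).foldl (pickSelStep seen norms) ("", 0, 1)
        = ((List.range norms.length).filter
            (fun i => !((norms.take i).contains (norms.getD i "")))).foldl
            (fun s i => (let n := norms.getD i ""
              let c : Int := (norms.count n : Int)
              if s.2.1 < c ∨ (¬ c < s.2.1 ∧ s.2.2 < -(i : Int))
              then (seen.getD i "", c, -(i : Int)) else s)) ("", 0, 1) by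
      rw [hlen, hstep, PySem.List.foldl_if_eq_foldl_filter]]
  rw [candidates_eq norms, ← hkeys, List.foldl_map]
  -- the per-key facts
  have hfact : ∀ k ∈ counts.keys,
      norms.getD ((PySem.List.index? norms k).getD 0) "" = k
      ∧ counts.getD k 0 = (norms.count k : Int)
      ∧ seen.getD ((PySem.List.index? norms k).getD 0) "" = ntf.getD k ""
      ∧ (((PySem.List.index? seen (ntf.getD k "")).getD 0 : Nat) : Int)
          = (((PySem.List.index? norms k).getD 0 : Nat) : Int)
      ∧ 1 ≤ (norms.count k : Int) := by
    intro k hk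
    obtain ⟨hcnt, j, hj1, hj2, hj3⟩ := hK k hk
    have hjf := index?_facts hj1
    have hmemn : k ∈ norms := by
      rw [hkeys, PySem.Set.mem_ofList] at hk; exact hk
    refine ⟨?_, hcnt, ?_, ?_, ?_⟩
    · rw [hj1]; exact hjf.2.1
    · rw [hj1]; exact hj3
    · rw [hj1, hj2]
    · have := List.count_pos_iff.mpr hmemn
      omega
  -- B's mapped fold is the abstract triple fold over the keys
  have hBfold : counts.keys.foldl
      (fun s k => (let n := norms.getD ((PySem.List.index? norms k).getD 0) ""
        let c : Int := (norms.count n : Int)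
        if s.2.1 < c ∨ (¬ c < s.2.1 ∧ s.2.2 < -(((PySem.List.index? norms k).getD 0 : Nat) : Int))
        then (seen.getD ((PySem.List.index? norms k).getD 0) "", c,
              -(((PySem.List.index? norms k).getD 0 : Nat) : Int))
        else s)) ("", 0, 1)
      = counts.keys.foldl
          (tStep (fun k => ntf.getD k "") (fun k => counts.getD k 0)
            (fun k => -(((PySem.List.index? seen (ntf.getD k "")).getD 0 : Nat) : Int)))
          ("", 0, 1) := by
    apply PySem.List.foldl_congr_mem
    intro acc k hk
    obtain ⟨hn, hc, hv, hi, _⟩ := hfact k hk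
    simp only [tStep, hn, ← hc, hv, hi]
  rw [hBfold]
  -- A side: max over items = Option fold over keys
  have hnd : counts.keys.Nodup := by rw [hkeys]; exact PySem.Set.nodup_ofList norms
  have hitems : counts.items = counts.keys.map (fun k => (k, counts.getD k 0)) :=
    PySem.Dict.items_eq_map_keys counts hnd 0
  cases hks : counts.keys with
  | nil =>
    have : counts.items = [] := by rw [hitems, hks]; rfl
    simp [this]
  | cons k0 t =>
    have hne : counts.items ≠ [] := by rw [hitems, hks]; simp
    rw [if_neg hne, hitems, max2?_eq_foldl_pmStep]
    have hA := foldl_pmStep_map (fun k => (k, counts.getD k 0))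
      (fun kv => kv.2)
      (fun kv => -(((PySem.List.index? seen (ntf.getD kv.1 "")).getD 0 : Nat) : Int))
      (fun k => counts.getD k 0)
      (fun k => -(((PySem.List.index? seen (ntf.getD k "")).getD 0 : Nat) : Int))
      counts.keys none (by intro m hm; cases hm) (by intro x _; exact ⟨rfl, rfl⟩)
    simp only [Option.map_none] at hA
    rw [hA]
    -- B: unfold the first step of the triple fold, then tStep_foldl_eq
    have hk0 : k0 ∈ counts.keys := by rw [hks]; simp
    obtain ⟨_, _, _, _, hpos⟩ := hfact k0 hk0
    have hc0 : (0 : Int) < counts.getD k0 0 := by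
      rw [(hK k0 hk0).1]; omega
    rw [hks]
    simp only [List.foldl_cons]
    have hfirst : tStep (fun k => ntf.getD k "") (fun k => counts.getD k 0)
        (fun k => -(((PySem.List.index? seen (ntf.getD k "")).getD 0 : Nat) : Int))
        ("", 0, 1) k0
        = (ntf.getD k0 "", counts.getD k0 0,
            -(((PySem.List.index? seen (ntf.getD k0 "")).getD 0 : Nat) : Int)) := by
      simp only [tStep]
      rw [if_pos (Or.inl hc0)]
    rw [hfirst, tStep_foldl_eq]
    have hpm : pmStep (fun k => counts.getD k 0)
        (fun k => -(((PySem.List.index? seen (ntf.getD k "")).getD 0 : Nat) : Int)) none k0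
        = some k0 := rfl
    rw [hpm]
    cases t.foldl (pmStep (fun k => counts.getD k 0)
        (fun k => -(((PySem.List.index? seen (ntf.getD k "")).getD 0 : Nat) : Int))) (some k0) with
    | none => rfl
    | some m => rfl
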